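-- pv_equiv track=rewrite | github.com/ashishsingh9450795818-dotcom/PALB-python- | countEvenLETTER.py | count
-- ===== SOURCE A (Python) =====
-- def count(s):
--     from collections import Counter
--
--     freq = Counter(s)
--
--     ans = 0
--     for ch in freq:
--         if freq[ch] % 2 == 0:
--             ans += 1
--
--     return ans
-- ===== SOURCE B (Python) =====
-- def count(s):
--     t = sorted(s)
--     ans = 0
--     i = 0
--     n = len(t)
--     while i < n:
--         j = i
--         while j < n and t[j] == t[i]:
--             j += 1
--         if (j - i) % 2 == 0:
--             ans += 1
--         i = j
--     return ans
-- ===== Notes on version B (the rewrite author's own statement) =====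
-- stated objective: alternative
-- what changed: Replaces the Counter frequency table and dict-key iteration with sorting the string and one linear scan over consecutive runs of equal characters, counting runs of even length.
import Mathlib
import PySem

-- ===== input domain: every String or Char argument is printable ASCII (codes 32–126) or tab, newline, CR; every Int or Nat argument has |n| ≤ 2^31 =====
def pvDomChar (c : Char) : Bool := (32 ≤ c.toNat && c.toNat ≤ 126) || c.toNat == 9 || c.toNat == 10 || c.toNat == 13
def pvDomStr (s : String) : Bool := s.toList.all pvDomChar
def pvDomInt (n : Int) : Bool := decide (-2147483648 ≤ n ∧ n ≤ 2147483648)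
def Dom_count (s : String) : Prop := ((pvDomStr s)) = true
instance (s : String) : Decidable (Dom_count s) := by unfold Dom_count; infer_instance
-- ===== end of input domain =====

-- B counts even-frequency characters by sorting and scanning runs instead of a Counter; alternative decomposition, not faster.

-- ===== PORT A =====
def count (s : String) : Int :=
  let freq := PySem.Dict.counter s.toList
  freq.keys.foldl (fun ans ch => if PySem.Int.mod (freq.getD ch 0) 2 == 0 then ans + 1 else ans) 0

-- ===== PORT B =====
-- the run scan of Source B: outer while advances i to j, inner while (takeWhile) finds the run end
def countRuns : List Char → Int
  | [] => 0
  | c :: rest =>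
      let runlen := 1 + (rest.takeWhile (fun x => x == c)).length
      (if runlen % 2 == 0 then (1 : Int) else 0) + countRuns (rest.dropWhile (fun x => x == c))
termination_by l => l.length
decreasing_by
  simp only [List.length_cons]
  have := List.length_dropWhile_le (p := fun x => x == c) (l := rest)
  omega

def count_alt (s : String) : Int :=
  countRuns (PySem.List.sorted s.toList (fun x => x) false)

-- ===== PRECONDITION & SPEC =====
def Spec_count (s : String) (out : Int) : Prop := out = count_alt s
instance (s : String) (out : Int) : Decidable (Spec_count s out) := by unfold Spec_count; infer_instance

-- ===== CLAIM (what is proved, stated in full; the proofs are below) =====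
def Claim_equal_count : Prop := ∀ (s : String), Dom_count s → Spec_count s (count s)

-- ===== LEMMAS AND PROOFS =====

-- two nodup lists with the same members have the same countP
theorem countP_nodup_ext (u v : List Char) (hu : u.Nodup) (hv : v.Nodup)
    (hm : ∀ x, x ∈ u ↔ x ∈ v) (p : Char → Bool) : u.countP p = v.countP p :=
  ((List.perm_ext_iff_of_nodup hu hv).2 hm).countP_eq p

theorem int_mod_two_natCast (n : Nat) : PySem.Int.mod (n : Int) 2 = ((n % 2 : Nat) : Int) := by
  simp [PySem.Int.mod, Int.fmod_eq_emod]

-- run scan over a sorted list = countP (even count) over the distinct elements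
theorem countRuns_eq (l : List Char) (h : l.Pairwise (· ≤ ·)) :
    countRuns l = ((PySem.Set.ofList l).countP (fun x => l.count x % 2 == 0) : Int) := by
  induction l using countRuns.induct with
  | case1 => simp [countRuns]
  | case2 c rest ih =>
    have hsplit := List.takeWhile_append_dropWhile (p := fun x => x == c) (l := rest)
    set t := rest.takeWhile (fun x => x == c) with ht
    set d := rest.dropWhile (fun x => x == c) with hd
    -- every element of t is c
    have htc : ∀ x ∈ t, x = c := by
      intro x hx
      have := List.mem_takeWhile_imp hx
      simpa using this
    -- every element of d is > c, in particular ≠ c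
    have hdc : ∀ x ∈ d, c < x := by
      intro x hx
      rcases hdd : d with _ | ⟨y, ys⟩
      · simp [hdd] at hx
      · have hy : ¬ (y == c) = true := by
          have hne : rest.dropWhile (fun x => x == c) ≠ [] := by rw [← hd, hdd]; simp
          have hnp := List.head_dropWhile_not (fun x => x == c) hne
          have hh : (rest.dropWhile (fun x => x == c)).head hne = y := by
            have : d.head (by rw [hd]; exact hne) = y := by simp [hdd]
            simpa [hd] using this
          rw [hh] at hnp
          simp [hnp]
        have hyne : y ≠ c := by simpa using hy
        have hyrest : y ∈ rest := by
          have : y ∈ d := by simp [hdd]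
          rw [← hsplit]; exact List.mem_append_right _ this
        have hcy : c ≤ y := (List.pairwise_cons.1 h).1 y hyrest
        have hcylt : c < y := lt_of_le_of_ne hcy (Ne.symm hyne)
        rw [hdd] at hx
        rcases List.mem_cons.1 hx with rfl | hx'
        · exact hcylt
        · -- d is sorted (sublist of rest which is sorted)
          have hdpw : d.Pairwise (· ≤ ·) :=
            List.Pairwise.sublist (List.dropWhile_sublist _) (List.pairwise_cons.1 h).2
          have : y ≤ x := by
            rw [hdd] at hdpw
            exact (List.pairwise_cons.1 hdpw).1 x hx'
          exact lt_of_lt_of_le hcylt this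
    have hcd : c ∉ d := fun hc => lt_irrefl c (hdc c hc)
    -- counts in l
    have hcount_c : (c :: rest).count c = 1 + t.length := by
      rw [List.count_cons_self, ← hsplit, List.count_append]
      have h1 : t.count c = t.length := by
        rw [List.count_eq_length]
        intro x hx; exact (htc x hx) ▸ rfl
      have h2 : d.count c = 0 := List.count_eq_zero.2 hcd
      omega
    have hcount_d : ∀ x ∈ d, (c :: rest).count x = d.count x := by
      intro x hx
      have hxc : x ≠ c := fun hxe => absurd (hxe ▸ hx) hcd
      have ht0 : t.count x = 0 := List.count_eq_zero.2 (fun hxt => hxc (htc x hxt))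
      rw [← hsplit]
      simp [List.count_append, ht0, Ne.symm hxc]
    -- d is pairwise
    have hdpw : d.Pairwise (· ≤ ·) :=
      List.Pairwise.sublist (List.dropWhile_sublist _) (List.pairwise_cons.1 h).2
    -- replace the ofList of l by the convenient nodup list c :: ofList d
    have hmem : ∀ x, x ∈ PySem.Set.ofList (c :: rest) ↔ x ∈ (c :: PySem.Set.ofList d) := by
      intro x
      simp only [PySem.Set.mem_ofList, List.mem_cons]
      constructor
      · rintro (rfl | hx)
        · exact Or.inl rfl
        · rw [← hsplit] at hx
          rcases List.mem_append.1 hx with hxt | hxd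
          · exact Or.inl (htc x hxt)
          · exact Or.inr hxd
      · rintro (rfl | hx)
        · exact Or.inl rfl
        · refine Or.inr ?_
          rw [← hsplit]; exact List.mem_append_right _ hx
    have hnodup : (c :: PySem.Set.ofList d).Nodup := by
      refine List.nodup_cons.2 ⟨?_, PySem.Set.nodup_ofList d⟩
      intro hc; exact hcd ((PySem.Set.mem_ofList _ _).1 hc)
    rw [countP_nodup_ext _ _ (PySem.Set.nodup_ofList _) hnodup hmem]
    rw [List.countP_cons]
    have hcongr : (PySem.Set.ofList d).countP (fun x => (c :: rest).count x % 2 == 0)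
        = (PySem.Set.ofList d).countP (fun x => d.count x % 2 == 0) := by
      apply List.countP_congr
      intro x hx
      rw [hcount_d x ((PySem.Set.mem_ofList _ _).1 hx)]
    rw [hcongr, hcount_c]
    simp only [countRuns]
    rw [ih hdpw, ← ht]
    push_cast
    rcases Nat.mod_two_eq_zero_or_one (1 + t.length) with hp | hp <;> simp [hp, add_comm]

theorem count_eq_countP (s : String) :
    count s = ((PySem.Set.ofList s.toList).countP (fun x => s.toList.count x % 2 == 0) : Int) := by
  unfold count
  simp only [PySem.Dict.keys_counter, PySem.Dict.getD_counter]
  rw [PySem.List.foldl_if_add_one, zero_add]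
  congr 1
  apply List.countP_congr
  intro x _
  rw [int_mod_two_natCast]
  rcases Nat.mod_two_eq_zero_or_one (s.toList.count x) with h | h <;> simp [h]

-- ===== VERDICT (by name: the statement is the Claim_ definition above) =====
theorem count_spec : Claim_equal_count := by
  intro s _
  unfold Spec_count count_alt
  rw [count_eq_countP]
  set cs := s.toList
  set m := PySem.List.sorted cs (fun x => x) false with hm
  have hpw : m.Pairwise (· ≤ ·) := by
    have := PySem.List.sorted_pairwise (xs := cs) (key := fun x => x)
    simpa using this
  rw [countRuns_eq m hpw]
  have hperm : m.Perm cs := PySem.List.sorted_perm cs (fun x => x) false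
  congr 1
  rw [countP_nodup_ext (PySem.Set.ofList cs) (PySem.Set.ofList m)
      (PySem.Set.nodup_ofList _) (PySem.Set.nodup_ofList _)
      (fun x => by simp [PySem.Set.mem_ofList, hperm.mem_iff])]
  apply List.countP_congr
  intro x _
  rw [hperm.count_eq]
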